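-- pv_equiv track=rewrite | github.com/Impalerzx/password-generator-strength-checker | password_checker.py | _looks_like_single_class
-- ===== SOURCE A (Python) =====
-- def _looks_like_single_class(password: str) -> bool:
--     """
--     Detect simple patterns like:
--     - only letters
--     - only digits
--     - only symbols
--     """
--     if not password:
--         return True
--
--     if password.isdigit():
--         return True
--     if password.isalpha():
--         return True
--     if all(not c.isalnum() for c in password):
--         return True
--
--     return False
-- ===== SOURCE B (Python) =====
-- def _looks_like_single_class(password: str) -> bool:
--     # One fused pass: track the three class flags together instead of three scans.
--     all_digit = all_alpha = all_symbol = True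
--     for c in password:
--         if not c.isdigit():
--             all_digit = False
--         if not c.isalpha():
--             all_alpha = False
--         if c.isalnum():
--             all_symbol = False
--     return all_digit or all_alpha or all_symbol
-- ===== Notes on version B (the rewrite author's own statement) =====
-- stated objective: alternative
-- what changed: B fuses A's three separate whole-string predicate scans (isdigit, isalpha, all-not-alnum) into a single traversal maintaining three boolean flags; the empty string falls out of the loop invariant instead of an early return.
import Mathlib
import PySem

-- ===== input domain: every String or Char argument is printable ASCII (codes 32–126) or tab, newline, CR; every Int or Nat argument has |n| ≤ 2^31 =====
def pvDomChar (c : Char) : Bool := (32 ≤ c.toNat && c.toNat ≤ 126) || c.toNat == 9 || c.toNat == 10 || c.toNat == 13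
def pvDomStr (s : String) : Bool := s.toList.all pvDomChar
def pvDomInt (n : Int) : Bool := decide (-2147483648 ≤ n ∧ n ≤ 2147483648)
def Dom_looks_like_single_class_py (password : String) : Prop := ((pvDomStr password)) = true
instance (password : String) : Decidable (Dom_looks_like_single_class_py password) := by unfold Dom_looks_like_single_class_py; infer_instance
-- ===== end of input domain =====

-- B fuses A's three separate whole-string predicate scans into one traversal keeping three flags.

-- ===== PORT A =====
def looks_like_single_class_py (password : String) : Bool :=
  if password.toList.isEmpty then true
  else if PySem.Str.strIsdigit password then true
  else if PySem.Str.strIsalpha password then true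
  else if password.toList.all (fun c => !(PySem.Chars.isalnum c)) then true
  else false

-- ===== PORT B =====
def pvStepB (f : Bool × Bool × Bool) (c : Char) : Bool × Bool × Bool :=
  ((if !(PySem.Chars.isdigit c) then false else f.1),
   (if !(PySem.Chars.isalpha c) then false else f.2.1),
   (if PySem.Chars.isalnum c then false else f.2.2))

def looks_like_single_class_py_alt (password : String) : Bool :=
  let f := password.toList.foldl pvStepB (true, true, true)
  f.1 || f.2.1 || f.2.2

-- ===== PRECONDITION & SPEC =====
def Spec_looks_like_single_class_py (password : String) (out : Bool) : Prop := out = looks_like_single_class_py_alt password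
instance (password : String) (out : Bool) : Decidable (Spec_looks_like_single_class_py password out) := by unfold Spec_looks_like_single_class_py; infer_instance

-- ===== CLAIM (what is proved, stated in full; the proofs are below) =====
def Claim_equal_looks_like_single_class_py : Prop := ∀ (password : String), Dom_looks_like_single_class_py password → Spec_looks_like_single_class_py password (looks_like_single_class_py password)

-- ===== LEMMAS AND PROOFS =====
lemma pvFoldB (l : List Char) (a b c : Bool) :
    l.foldl pvStepB (a, b, c) =
      (a && l.all (fun x => PySem.Chars.isdigit x),
       b && l.all (fun x => PySem.Chars.isalpha x),
       c && l.all (fun x => !(PySem.Chars.isalnum x))) := by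
  induction l generalizing a b c with
  | nil => simp
  | cons h t ih =>
      simp only [List.foldl_cons, List.all_cons, pvStepB, ih]
      cases PySem.Chars.isdigit h <;> cases PySem.Chars.isalpha h <;>
        cases PySem.Chars.isalnum h <;> simp

-- ===== VERDICT (by name: the statement is the Claim_ definition above) =====
theorem looks_like_single_class_py_spec : Claim_equal_looks_like_single_class_py := by
  intro password _
  unfold Spec_looks_like_single_class_py looks_like_single_class_py looks_like_single_class_py_alt
  rw [pvFoldB]
  cases hl : password.toList with
  | nil => simp
  | cons x xs =>
      simp only [List.isEmpty_cons, Bool.true_and]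
      rw [show PySem.Str.strIsdigit password = PySem.Chars.strIsdigit password.toList from
            (PySem.Str.strIsdigit_eq password).symm,
          show PySem.Str.strIsalpha password = PySem.Chars.strIsalpha password.toList from
            (PySem.Str.strIsalpha_eq password).symm, hl]
      simp only [PySem.Chars.strIsdigit, PySem.Chars.strIsalpha]
      split_ifs <;> simp_all
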